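-- pv_equiv track=rewrite | github.com/jwestrob/ELSA | benchmarks/scripts/find_conserved_neighborhoods.py | extract_kmers
-- ===== SOURCE A (Python) =====
-- def canonicalize_kmer(kmer: tuple[str, ...]) -> tuple[str, ...]:
--     """Canonicalize k-mer by choosing lexicographically smaller of forward/reverse."""
--     rev = tuple(reversed(kmer))
--     return min(kmer, rev)
--
-- def extract_kmers(
--     og_sequence: list[str],
--     k: int,
-- ) -> list[tuple[tuple[str, ...], int]]:
--     """Extract all k-mers from an orthogroup sequence.
--
--     Returns list of (canonical_kmer, position) tuples.
--     """
--     kmers = []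
--     for i in range(len(og_sequence) - k + 1):
--         kmer = tuple(og_sequence[i:i + k])
--         canonical = canonicalize_kmer(kmer)
--         kmers.append((canonical, i))
--     return kmers
-- ===== SOURCE B (Python) =====
-- def extract_kmers(og_sequence, k):
--     """Extract all canonical k-mers with positions.
--
--     Walks the sequence BACK-TO-FRONT from the last window, sliding the window
--     one step left each time (prepend the previous element, drop the last), and
--     reverses the accumulated output at the end; no per-position re-slicing.
--     """
--     if k < 1 or k > len(og_sequence):
--         return []
--     out = []
--     pos = len(og_sequence) - k
--     window = tuple(og_sequence[pos:])
--     while True: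
--         rev = window[::-1]
--         out.append((rev if rev < window else window, pos))
--         if pos == 0:
--             break
--         pos -= 1
--         window = (og_sequence[pos],) + window[:-1]
--     out.reverse()
--     return out
-- ===== Notes on version B (the rewrite author's own statement) =====
-- stated objective: alternative
-- what changed: B walks the sequence back-to-front from the last window, maintaining the window incrementally (prepend previous element, drop last) in a while loop with an accumulator it reverses at the end, instead of A's forward index loop that re-slices a fresh k-window at every position.
-- intended difference: For k <= 0, A returns one empty k-mer per position in range(len(og_sequence)-k+1) (positions past the end of the sequence, an artefact of empty slices), while B returns [], the intended value since no k-mer of non-positive length exists. — e.g. on extract_kmers(["a"], 0): A returns [([], 0), ([], 1)], B returns []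
import Mathlib
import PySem

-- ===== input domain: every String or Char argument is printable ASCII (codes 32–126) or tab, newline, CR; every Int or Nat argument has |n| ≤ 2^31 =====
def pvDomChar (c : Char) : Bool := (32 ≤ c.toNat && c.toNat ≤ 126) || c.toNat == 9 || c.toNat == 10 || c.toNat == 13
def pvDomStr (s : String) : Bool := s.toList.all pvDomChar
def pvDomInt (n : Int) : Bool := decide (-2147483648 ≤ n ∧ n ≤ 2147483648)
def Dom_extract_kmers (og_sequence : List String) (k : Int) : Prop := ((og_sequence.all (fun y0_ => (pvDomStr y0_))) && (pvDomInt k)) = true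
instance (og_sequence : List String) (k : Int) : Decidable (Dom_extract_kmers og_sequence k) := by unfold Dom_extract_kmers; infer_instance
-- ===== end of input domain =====

-- B walks the sequence back-to-front from the last window, sliding the window incrementally and
-- reversing the accumulated output at the end (alternative decomposition, same cost); on the
-- degenerate inputs k ≤ 0 it returns [] instead of A's list of empty k-mers (see D_ below).

-- Python's `min(t, u)` / `t < u` on tuples of strings: lexicographic; min returns the FIRST argument on ties.
def pvLexLt : List String → List String → Bool
  | _, [] => false
  | [], _ :: _ => true
  | a :: as, b :: bs => if a < b then true else if b < a then false else pvLexLt as bs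

def pvMinPair (t u : List String) : List String := if pvLexLt u t then u else t

-- ===== PORT A =====
def canonicalize_kmer (kmer : List String) : List String :=
  let rev := kmer.reverse
  pvMinPair kmer rev

def extract_kmers (og_sequence : List String) (k : Int) : List (List String × Int) :=
  (PySem.List.pyRange 0 ((og_sequence.length : Int) - k + 1) 1).foldl
    (fun kmers i =>
      let kmer := PySem.List.slice og_sequence (some i) (some (i + k))
      let canonical := canonicalize_kmer kmer
      kmers ++ [(canonical, i)]) []

-- ===== PORT B =====
-- the while-True loop: recursion on pos (a Nat: the loop only runs with 0 ≤ pos ≤ len - k);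
-- window[::-1] is List.reverse (exact: PySem.List.slice?_none_none_neg_one), window[:-1] is
-- PySem.List.slice, og_sequence[pos] is PySem.List.pyGetD (always in range here).
def goB (seq : List String) : Nat → List String → List (List String × Int) → List (List String × Int)
  | pos, window, out =>
    let rev := window.reverse
    let out' := out ++ [((if pvLexLt rev window then rev else window), (pos : Int))]
    match pos with
    | 0 => out'
    | p + 1 => goB seq p ((PySem.List.pyGetD seq (p : Int) "") :: PySem.List.slice window none (some (-1))) out'

def extract_kmers_alt (og_sequence : List String) (k : Int) : List (List String × Int) :=
  if k < 1 ∨ (og_sequence.length : Int) < k then [] else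
  let pos := og_sequence.length - k.toNat
  let window := PySem.List.slice og_sequence (some ((og_sequence.length : Int) - k)) none
  (goB og_sequence pos window []).reverse

-- ===== PRECONDITION & SPEC =====
-- For k ≤ 0 A returns one empty "k-mer" per position in range(len-k+1) — positions past the end of the
-- sequence — an artefact of slicing; B returns [] there, the intended value: there are no k-mers of length ≤ 0.
def D_extract_kmers (_og_sequence : List String) (k : Int) : Prop := k ≤ 0
instance (og_sequence : List String) (k : Int) : Decidable (D_extract_kmers og_sequence k) := by unfold D_extract_kmers; infer_instance

def Spec_extract_kmers (og_sequence : List String) (k : Int) (out : List (List String × Int)) : Prop :=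
  ¬ D_extract_kmers og_sequence k → out = extract_kmers_alt og_sequence k
instance (og_sequence : List String) (k : Int) (out : List (List String × Int)) : Decidable (Spec_extract_kmers og_sequence k out) := by unfold Spec_extract_kmers; infer_instance

def pvDiffWitness_extract_kmers : List String × Int := (["a"], 0)
def pvDiffWitnessOut_extract_kmers : (List (List String × Int)) × (List (List String × Int)) :=
  ([([], 0), ([], 1)], [])

-- ===== CLAIM (what is proved, stated in full; the proofs are below) =====
def Claim_unchanged_extract_kmers : Prop := ∀ (og_sequence : List String) (k : Int), Dom_extract_kmers og_sequence k → Spec_extract_kmers og_sequence k (extract_kmers og_sequence k)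
def Claim_changed_extract_kmers : Prop := Dom_extract_kmers (pvDiffWitness_extract_kmers.1) (pvDiffWitness_extract_kmers.2) ∧ D_extract_kmers (pvDiffWitness_extract_kmers.1) (pvDiffWitness_extract_kmers.2) ∧ extract_kmers (pvDiffWitness_extract_kmers.1) (pvDiffWitness_extract_kmers.2) = pvDiffWitnessOut_extract_kmers.1 ∧ extract_kmers_alt (pvDiffWitness_extract_kmers.1) (pvDiffWitness_extract_kmers.2) = pvDiffWitnessOut_extract_kmers.2 ∧ pvDiffWitnessOut_extract_kmers.1 ≠ pvDiffWitnessOut_extract_kmers.2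
def Claim_exact_extract_kmers : Prop := ∀ (og_sequence : List String) (k : Int), Dom_extract_kmers og_sequence k → D_extract_kmers og_sequence k → extract_kmers og_sequence k ≠ extract_kmers_alt og_sequence k

-- ===== LEMMAS AND PROOFS =====

-- A as a map over the (integer) positions, for any k.
theorem extract_kmers_eq_map (og_sequence : List String) (k : Int) :
    extract_kmers og_sequence k =
      (PySem.List.pyRange 0 ((og_sequence.length : Int) - k + 1) 1).map
        (fun i => (canonicalize_kmer (PySem.List.slice og_sequence (some i) (some (i + k))), i)) := by
  unfold extract_kmers
  exact PySem.List.foldl_append_singleton_eq_map _ _ []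

-- B's loop, characterised: with window = the k-window at pos and room for it, goB emits the
-- canonical entries for positions pos, pos-1, …, 0 (in that order) after out.
theorem goB_eq (seq : List String) (kk : Nat) (hk : 1 ≤ kk) :
    ∀ (pos : Nat) (window : List String) (out : List (List String × Int)),
      window = (seq.drop pos).take kk → pos + kk ≤ seq.length →
      goB seq pos window out =
        out ++ ((List.range (pos + 1)).map
          (fun i => (canonicalize_kmer ((seq.drop i).take kk), (i : Int)))).reverse := by
  intro pos
  induction pos with
  | zero =>
      intro window out hw _
      simp [goB, hw, canonicalize_kmer, pvMinPair]
  | succ p ih =>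
      intro window out hw hle
      have hp : p < seq.length := by omega
      have hwin' : (PySem.List.pyGetD seq (p : Int) "") :: PySem.List.slice window none (some (-1)) =
          (seq.drop p).take kk := by
        have hlen : window.length = kk := by
          rw [hw]; simp; omega
        rw [PySem.List.slice_to_neg_one, PySem.List.pyGetD_natCast]
        have hdrop : seq.drop p = seq[p] :: seq.drop (p + 1) :=
          List.drop_eq_getElem_cons hp
        rw [hdrop]
        have hkk : kk = (kk - 1) + 1 := by omega
        rw [hkk, List.take_succ_cons, List.dropLast_eq_take, hlen, hw, List.take_take]
        have : min (kk - 1) kk = kk - 1 := by omega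
        rw [this]
        simp [List.getElem?_eq_getElem hp]
      have hstep : goB seq (p + 1) window out =
          goB seq p ((PySem.List.pyGetD seq (p : Int) "") :: PySem.List.slice window none (some (-1)))
            (out ++ [((if pvLexLt window.reverse window then window.reverse else window), ((p + 1 : Nat) : Int))]) := by
        rfl
      rw [hstep, ih _ _ hwin' (by omega)]
      rw [List.range_succ (n := p + 1), List.map_append, List.reverse_append]
      simp [hw, canonicalize_kmer, pvMinPair]

theorem extract_kmers_spec' (og_sequence : List String) (k : Int) (hk : 1 ≤ k) :
    extract_kmers og_sequence k = extract_kmers_alt og_sequence k := by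
  unfold extract_kmers_alt
  by_cases hbig : (og_sequence.length : Int) < k
  · rw [if_pos (Or.inr hbig), extract_kmers_eq_map, PySem.List.pyRange_one]
    have : (((og_sequence.length : Int) - k + 1) - 0).toNat = 0 := by omega
    rw [this]
    simp
  rw [if_neg (by omega)]
  have hkk : 1 ≤ k.toNat := by omega
  have hle : k.toNat ≤ og_sequence.length := by omega
  have hw0 : PySem.List.slice og_sequence (some ((og_sequence.length : Int) - k)) none =
      (og_sequence.drop (og_sequence.length - k.toNat)).take k.toNat := by
    rw [PySem.List.slice_from _ (by omega)]
    have h1 : ((og_sequence.length : Int) - k).toNat = og_sequence.length - k.toNat := by omega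
    rw [h1]
    exact (List.take_of_length_le (by simp; omega)).symm
  show extract_kmers og_sequence k =
      (goB og_sequence (og_sequence.length - k.toNat)
        (PySem.List.slice og_sequence (some ((og_sequence.length : Int) - k)) none) []).reverse
  rw [goB_eq og_sequence k.toNat hkk (og_sequence.length - k.toNat) _ [] hw0 (by omega)]
  rw [List.nil_append, List.reverse_reverse]
  rw [extract_kmers_eq_map, PySem.List.pyRange_one]
  have hM : (((og_sequence.length : Int) - k + 1) - 0).toNat = og_sequence.length - k.toNat + 1 := by
    omega
  rw [hM, List.map_map]
  apply List.map_congr_left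
  intro i _
  have hslice : PySem.List.slice og_sequence (some ((0 : Int) + i)) (some ((0 : Int) + i + k)) =
      (og_sequence.drop i).take k.toNat := by
    have : (0 : Int) + i + k = ((i + k.toNat : Nat) : Int) := by omega
    rw [this, show ((0 : Int) + i) = ((i : Nat) : Int) by omega, PySem.List.slice_natCast]
    congr 1
    omega
  simp only [Function.comp, hslice]
  simp

theorem extract_kmers_len (og_sequence : List String) (k : Int) :
    (extract_kmers og_sequence k).length = (((og_sequence.length : Int) - k + 1)).toNat := by
  rw [extract_kmers_eq_map]
  simp [PySem.List.pyRange_one]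

-- ===== VERDICT (by name: the statement is the Claim_ definition above) =====
theorem extract_kmers_spec : Claim_unchanged_extract_kmers := by
  intro og_sequence k _ hD
  have hk : 1 ≤ k := by unfold D_extract_kmers at hD; omega
  exact extract_kmers_spec' og_sequence k hk

theorem extract_kmers_changed : Claim_changed_extract_kmers := by
  unfold Claim_changed_extract_kmers; decide

theorem extract_kmers_tight : Claim_exact_extract_kmers := by
  intro og_sequence k _ hD h
  have hB : extract_kmers_alt og_sequence k = [] := by
    unfold extract_kmers_alt
    have : k < 1 := by unfold D_extract_kmers at hD; omega
    rw [if_pos (Or.inl this)]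
  have hlen : (extract_kmers og_sequence k).length = (((og_sequence.length : Int) - k + 1)).toNat :=
    extract_kmers_len og_sequence k
  rw [h, hB] at hlen
  unfold D_extract_kmers at hD
  simp at hlen
  omega
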